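-- pv_equiv track=rewrite | github.com/unknowncoder05/PilotGPT | full_project.py | parse_file_content
-- ===== SOURCE A (Python) =====
-- def parse_file_content(string: str) -> dict:
--     files = {}
--     current_file = None
--     current_content = []
--     for line in string.split('\n'):
--         if line.startswith('file:'):
--             if current_file is not None:
--                 files[current_file] = '\n'.join(current_content)
--             current_file = line.split(':')[1].strip()
--             current_content = []
--         elif line == 'content >>>':
--             continue
--         elif line == '<<<':
--             continue
--         else:
--             current_content.append(line)
--     if current_file is not None:
--         files[current_file] = '\n'.join(current_content)
--     return files
-- ===== SOURCE B (Python) =====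
-- def parse_file_content(string: str) -> dict:
--     lines = string.split('\n')
--     n = len(lines)
--     i = 0
--     # skip everything before the first header
--     while i < n and not lines[i].startswith('file:'):
--         i += 1
--     files = {}
--     while i < n:
--         # lines[i] is a 'file:' header
--         name = lines[i].split(':')[1].strip()
--         j = i + 1
--         body = []
--         while j < n and not lines[j].startswith('file:'):
--             if lines[j] not in ('content >>>', '<<<'):
--                 body.append(lines[j])
--             j += 1
--         files[name] = '\n'.join(body)
--         i = j
--     return files
-- ===== Notes on version B (the rewrite author's own statement) =====
-- stated objective: simpler
-- what changed: Replaced A's single fold carrying a current_file/current_content flush state (with an Optional sentinel and a trailing flush) by a span-based two-level scan: skip to the first header, then for each header take the body lines up to the next header, filter the sentinel lines, and insert the section directly.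
import Mathlib
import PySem

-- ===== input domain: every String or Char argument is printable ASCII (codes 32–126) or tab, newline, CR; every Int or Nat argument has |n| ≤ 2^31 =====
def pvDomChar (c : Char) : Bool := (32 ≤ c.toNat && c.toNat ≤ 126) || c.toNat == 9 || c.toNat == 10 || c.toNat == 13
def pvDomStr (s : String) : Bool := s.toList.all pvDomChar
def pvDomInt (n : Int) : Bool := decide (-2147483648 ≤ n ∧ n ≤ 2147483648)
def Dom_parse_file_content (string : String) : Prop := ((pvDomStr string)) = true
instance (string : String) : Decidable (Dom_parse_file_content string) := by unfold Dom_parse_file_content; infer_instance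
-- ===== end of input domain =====

-- B replaces A's fold with flush state (current_file/current_content) by a span-based
-- two-level scan that inserts each section directly; objective: simpler, same cost.

-- shared by both pythons: line.split(':')[1].strip(); both getD defaults are exact here:
-- split? is none only for sep = "", and the callers only apply pvName to lines starting
-- with 'file:', so the split has ≥ 2 pieces
def pvName (l : String) : String :=
  PySem.Str.strip (((PySem.Str.split? l ":").getD []).getD 1 "")

def pvHeader (l : String) : Bool := PySem.Str.startswith l "file:"

-- ===== PORT A =====
-- the for-loop of A, state = (files, current_file, current_content)
def pvALoop : List String → PySem.Dict String String → Option String → List String →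
    PySem.Dict String String
  | [], files, cur, acc =>
      match cur with
      | some f => files.insert f (PySem.Str.join "\n" acc)
      | none => files
  | l :: ls, files, cur, acc =>
      if pvHeader l then
        pvALoop ls
          (match cur with
           | some f => files.insert f (PySem.Str.join "\n" acc)
           | none => files)
          (some (pvName l)) []
      else if l == "content >>>" then pvALoop ls files cur acc
      else if l == "<<<" then pvALoop ls files cur acc
      else pvALoop ls files cur (acc ++ [l])

def parse_file_content (string : String) : List (String × String) :=
  (pvALoop ((PySem.Str.split? string "\n").getD []) PySem.Dict.empty none []).items

-- ===== PORT B =====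
def pvSentinel (l : String) : Bool := l == "content >>>" || l == "<<<"

-- B's outer while loop: head of `lines` (if any) is a header; the inner while loop
-- collecting the body up to the next header is the takeWhile/dropWhile span
def pvBLoop : List String → PySem.Dict String String → PySem.Dict String String
  | [], files => files
  | l :: t, files =>
      let body := (t.takeWhile (fun x => !pvHeader x)).filter (fun x => !pvSentinel x)
      pvBLoop (t.dropWhile (fun x => !pvHeader x))
        (files.insert (pvName l) (PySem.Str.join "\n" body))
termination_by lines _ => lines.length
decreasing_by
  simp only [List.length_cons]
  exact Nat.lt_succ_of_le (List.length_dropWhile_le _ _)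

def parse_file_content_alt (string : String) : List (String × String) :=
  let lines := (PySem.Str.split? string "\n").getD []
  (pvBLoop (lines.dropWhile (fun x => !pvHeader x)) PySem.Dict.empty).items

-- ===== PRECONDITION & SPEC =====
def Spec_parse_file_content (string : String) (out : List (String × String)) : Prop := out = parse_file_content_alt string
instance (string : String) (out : List (String × String)) : Decidable (Spec_parse_file_content string out) := by unfold Spec_parse_file_content; infer_instance

-- ===== CLAIM (what is proved, stated in full; the proofs are below) =====
def Claim_equal_parse_file_content : Prop := ∀ (string : String), Dom_parse_file_content string → Spec_parse_file_content string (parse_file_content string)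

-- ===== LEMMAS AND PROOFS =====

-- with an open file, A's loop flushes acc ++ (filtered body) at the next header/end,
-- which is exactly B's per-section insert
theorem pvALoop_some (ls : List String) (files : PySem.Dict String String)
    (f : String) (acc : List String) :
    pvALoop ls files (some f) acc =
      pvBLoop (ls.dropWhile (fun x => !pvHeader x))
        (files.insert f (PySem.Str.join "\n"
          (acc ++ (ls.takeWhile (fun x => !pvHeader x)).filter (fun x => !pvSentinel x)))) := by
  induction ls generalizing files f acc with
  | nil => simp [pvALoop, pvBLoop]
  | cons l t ih =>
    by_cases hh : pvHeader l = true
    · rw [pvALoop]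
      simp only [hh, if_true, List.dropWhile_cons, List.takeWhile_cons,
        Bool.not_true, Bool.false_eq_true, if_false]
      rw [ih, pvBLoop]
      simp
    · have hh' : pvHeader l = false := by simp_all
      by_cases hs : pvSentinel l = true
      · have h1 : (l == "content >>>") || (l == "<<<") := hs
        rw [pvALoop]
        simp only [hh', Bool.false_eq_true, if_false]
        rw [List.dropWhile_cons, List.takeWhile_cons]
        simp only [hh', Bool.not_false, if_true, List.filter_cons, hs,
          Bool.not_true, Bool.false_eq_true, if_false]
        rcases Bool.or_eq_true_iff.mp h1 with h | h
        · simp only [h, if_true]; exact ih files f acc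
        · have h2 : (l == "content >>>") = false ∨ (l == "content >>>") = true :=
            Or.symm (em _) |>.imp (fun h => by simp_all) id
          cases h2 with
          | inl h0 =>
            simp only [h0, Bool.false_eq_true, if_false, h, if_true]
            exact ih files f acc
          | inr h0 => simp only [h0, if_true]; exact ih files f acc
      · have hs' : pvSentinel l = false := by simp_all
        have hc : (l == "content >>>") = false := by
          cases h : (l == "content >>>") <;> simp_all [pvSentinel]
        have hl : (l == "<<<") = false := by
          cases h : (l == "<<<") <;> simp_all [pvSentinel]
        rw [pvALoop]
        simp only [hh', Bool.false_eq_true, if_false, hc, hl]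
        rw [List.dropWhile_cons, List.takeWhile_cons]
        simp only [hh', Bool.not_false, if_true, List.filter_cons, hs',
          Bool.not_false]
        rw [ih]
        simp

-- with no open file, A's loop only skips lines until the first header
theorem pvALoop_none (ls : List String) (files : PySem.Dict String String)
    (acc : List String) :
    pvALoop ls files none acc =
      pvBLoop (ls.dropWhile (fun x => !pvHeader x)) files := by
  induction ls generalizing acc with
  | nil => simp [pvALoop, pvBLoop]
  | cons l t ih =>
    by_cases hh : pvHeader l = true
    · rw [pvALoop]
      simp only [hh, if_true, List.dropWhile_cons, Bool.not_true,
        Bool.false_eq_true, if_false]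
      rw [pvALoop_some, pvBLoop]
      simp
    · have hh' : pvHeader l = false := by simp_all
      rw [pvALoop]
      simp only [hh', Bool.false_eq_true, if_false, List.dropWhile_cons, Bool.not_false,
        if_true]
      split_ifs <;> exact ih _

-- ===== VERDICT (by name: the statement is the Claim_ definition above) =====
theorem parse_file_content_spec : Claim_equal_parse_file_content := by
  intro s _
  unfold Spec_parse_file_content parse_file_content parse_file_content_alt
  rw [pvALoop_none]
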